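-- pv_equiv track=rewrite | github.com/Kierstin18/pocket-mini-app | streamlit_app.py | manhattan_path
-- ===== SOURCE A (Python) =====
-- GRID = 5
--
-- def idx_to_xy(i):
--     return i % GRID, i // GRID
--
-- def xy_to_idx(x, y):
--     return y * GRID + x
--
-- def manhattan_path(start, end):
--     sx, sy = idx_to_xy(start)
--     ex, ey = idx_to_xy(end)
--     path = []
--     cx, cy = sx, sy
--     while (cx, cy) != (ex, ey):
--         if cx < ex: cx += 1
--         elif cx > ex: cx -= 1
--         elif cy < ey: cy += 1
--         elif cy > ey: cy -= 1
--         path.append(xy_to_idx(cx, cy))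
--     return path
-- ===== SOURCE B (Python) =====
-- GRID = 5
--
-- def manhattan_path(start, end):
--     sx, sy = start % GRID, start // GRID
--     ex, ey = end % GRID, end // GRID
--     if sx <= ex:
--         horiz = [sy * GRID + x for x in range(sx + 1, ex + 1)]
--     else:
--         horiz = [sy * GRID + x for x in range(sx - 1, ex - 1, -1)]
--     if sy <= ey:
--         vert = [y * GRID + ex for y in range(sy + 1, ey + 1)]
--     else:
--         vert = [y * GRID + ex for y in range(sy - 1, ey - 1, -1)]
--     return horiz + vert
-- ===== Notes on version B (the rewrite author's own statement) =====
-- stated objective: simpler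
-- what changed: Replaces A's interleaved step-by-step while-loop (branching each iteration) by computing the two axis legs directly as range comprehensions (horizontal leg at row sy, then vertical leg at column ex) and concatenating them.
import Mathlib
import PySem

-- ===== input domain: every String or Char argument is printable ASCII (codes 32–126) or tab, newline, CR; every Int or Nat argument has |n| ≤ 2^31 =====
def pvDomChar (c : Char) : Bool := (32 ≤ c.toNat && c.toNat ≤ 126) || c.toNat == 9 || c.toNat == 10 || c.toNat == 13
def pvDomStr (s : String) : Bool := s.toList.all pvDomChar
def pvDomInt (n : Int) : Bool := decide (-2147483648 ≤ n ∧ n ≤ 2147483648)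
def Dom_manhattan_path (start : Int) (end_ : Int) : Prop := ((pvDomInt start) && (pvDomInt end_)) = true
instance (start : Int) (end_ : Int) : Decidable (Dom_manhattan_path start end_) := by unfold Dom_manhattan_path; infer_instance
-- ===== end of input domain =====

-- B replaces A's interleaved step-by-step while-loop by two concatenated axis legs
-- built with range comprehensions (objective: simpler decomposition, same cost).

-- ===== PORT A =====
-- the while loop of A: four ordered branches, appending the updated cell each step
def mpLoop (cx cy ex ey : Int) : List Int :=
  if cx < ex then (cy * 5 + (cx + 1)) :: mpLoop (cx + 1) cy ex ey
  else if ex < cx then (cy * 5 + (cx - 1)) :: mpLoop (cx - 1) cy ex ey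
  else if cy < ey then ((cy + 1) * 5 + cx) :: mpLoop cx (cy + 1) ex ey
  else if ey < cy then ((cy - 1) * 5 + cx) :: mpLoop cx (cy - 1) ex ey
  else []
termination_by ((ex - cx).natAbs + (ey - cy).natAbs)
decreasing_by all_goals omega

def manhattan_path (start : Int) (end_ : Int) : List Int :=
  mpLoop (PySem.Int.mod start 5) (PySem.Int.floordiv start 5)
         (PySem.Int.mod end_ 5) (PySem.Int.floordiv end_ 5)

-- ===== PORT B =====
def manhattan_path_alt (start : Int) (end_ : Int) : List Int :=
  let sx := PySem.Int.mod start 5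
  let sy := PySem.Int.floordiv start 5
  let ex := PySem.Int.mod end_ 5
  let ey := PySem.Int.floordiv end_ 5
  let horiz :=
    if sx ≤ ex then (PySem.List.pyRange (sx + 1) (ex + 1) 1).map (fun x => sy * 5 + x)
    else (PySem.List.pyRange (sx - 1) (ex - 1) (-1)).map (fun x => sy * 5 + x)
  let vert :=
    if sy ≤ ey then (PySem.List.pyRange (sy + 1) (ey + 1) 1).map (fun y => y * 5 + ex)
    else (PySem.List.pyRange (sy - 1) (ey - 1) (-1)).map (fun y => y * 5 + ex)
  horiz ++ vert

-- ===== PRECONDITION & SPEC =====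
def Spec_manhattan_path (start : Int) (end_ : Int) (out : List Int) : Prop := out = manhattan_path_alt start end_
instance (start : Int) (end_ : Int) (out : List Int) : Decidable (Spec_manhattan_path start end_ out) := by unfold Spec_manhattan_path; infer_instance

-- ===== CLAIM (what is proved, stated in full; the proofs are below) =====
def Claim_equal_manhattan_path : Prop := ∀ (start : Int) (end_ : Int), Dom_manhattan_path start end_ → Spec_manhattan_path start end_ (manhattan_path start end_)

-- ===== LEMMAS AND PROOFS =====

-- B's two legs, as a function of the loop state
def mpLegs (cx cy ex ey : Int) : List Int :=
  (if cx ≤ ex then (PySem.List.pyRange (cx + 1) (ex + 1) 1).map (fun x => cy * 5 + x)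
   else (PySem.List.pyRange (cx - 1) (ex - 1) (-1)).map (fun x => cy * 5 + x)) ++
  (if cy ≤ ey then (PySem.List.pyRange (cy + 1) (ey + 1) 1).map (fun y => y * 5 + ex)
   else (PySem.List.pyRange (cy - 1) (ey - 1) (-1)).map (fun y => y * 5 + ex))

-- stepping a countdown leg: peel the first cell, the tail is the leg of the advanced state
theorem leg_step_neg (cx ex : Int) (h : ex < cx) :
    PySem.List.pyRange (cx - 1) (ex - 1) (-1) =
      (cx - 1) :: (if cx - 1 ≤ ex then PySem.List.pyRange (cx - 1 + 1) (ex + 1) 1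
                   else PySem.List.pyRange (cx - 1 - 1) (ex - 1) (-1)) := by
  by_cases h' : cx - 1 ≤ ex
  · rw [if_pos h', PySem.List.pyRange_neg_one_cons (by omega : ex - 1 < cx - 1),
        PySem.List.pyRange_one_eq_nil (by omega : ex + 1 ≤ cx - 1 + 1),
        PySem.List.pyRange_neg_one_eq_nil (by omega : cx - 1 - 1 ≤ ex - 1)]
  · rw [if_neg h']
    exact PySem.List.pyRange_neg_one_cons (by omega : ex - 1 < cx - 1)

theorem mpLoop_eq_legs (cx cy ex ey : Int) : mpLoop cx cy ex ey = mpLegs cx cy ex ey := by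
  induction cx, cy using mpLoop.induct ex ey with
  | case1 cx cy h ih =>
    rw [mpLoop, if_pos h, ih]
    unfold mpLegs
    rw [if_pos (by omega : cx ≤ ex), if_pos (by omega : cx + 1 ≤ ex),
        PySem.List.pyRange_one_cons (by omega : cx + 1 < ex + 1)]
    simp
  | case2 cx cy h1 h2 ih =>
    rw [mpLoop, if_neg h1, if_pos h2, ih]
    unfold mpLegs
    rw [if_neg (by omega : ¬ cx ≤ ex), leg_step_neg cx ex h2]
    simp
    split <;> rfl
  | case3 cx cy h1 h2 h3 ih =>
    rw [mpLoop, if_neg h1, if_neg h2, if_pos h3, ih]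
    have hx : cx = ex := by omega
    subst hx
    unfold mpLegs
    rw [if_pos (by omega : cy ≤ ey), if_pos (by omega : cy + 1 ≤ ey),
        PySem.List.pyRange_one_cons (by omega : cy + 1 < ey + 1)]
    simp
  | case4 cx cy h1 h2 h3 h4 ih =>
    rw [mpLoop, if_neg h1, if_neg h2, if_neg h3, if_pos h4, ih]
    have hx : cx = ex := by omega
    subst hx
    unfold mpLegs
    rw [if_neg (by omega : ¬ cy ≤ ey), leg_step_neg cy ey h4]
    simp
    split <;> rfl
  | case5 cx cy h1 h2 h3 h4 =>
    have hx : cx = ex := by omega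
    have hy : cy = ey := by omega
    subst hx; subst hy
    rw [mpLoop]
    simp [mpLegs, PySem.List.pyRange_one_eq_nil (by omega : ex + 1 ≤ ex + 1)]

-- ===== VERDICT (by name: the statement is the Claim_ definition above) =====
theorem manhattan_path_spec : Claim_equal_manhattan_path := by
  intro start end_ _
  unfold Spec_manhattan_path manhattan_path manhattan_path_alt
  rw [mpLoop_eq_legs]
  rfl
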